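-- pv_equiv track=rewrite | github.com/iawnix/US | BuHe.py | DivideName
-- ===== SOURCE A (Python) =====
-- def DivideName(name):
--     start = 0
--     move = 0
--     result = []
--     for i in range(1,len(name)):
--         move = i
--         if name[i].isalpha():
--             result.append("".join([j for j in name[start:move]]).replace("_","."))
--             start = i
--         if i == len(name) - 1:
--             result.append("".join([j for j in name[start:move + 1]]).replace("_","."))
--     return result
-- ===== SOURCE B (Python) =====
-- def DivideName(name):
--     if len(name) < 2:
--         return []
--     cuts = [0] + [i for i in range(1, len(name)) if name[i].isalpha()] + [len(name)]
--     return [name[cuts[k]:cuts[k + 1]].replace("_", ".") for k in range(len(cuts) - 1)]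
-- ===== Notes on version B (the rewrite author's own statement) =====
-- stated objective: alternative
-- what changed: B separates boundary detection from segment emission: it builds the full cut-index list [0]+alpha positions+[len(name)] first, then emits each segment by slicing between consecutive cuts, instead of A's single loop that interleaves detection with inline appends and carried start/move state (plus an early len<2 guard).
import Mathlib
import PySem

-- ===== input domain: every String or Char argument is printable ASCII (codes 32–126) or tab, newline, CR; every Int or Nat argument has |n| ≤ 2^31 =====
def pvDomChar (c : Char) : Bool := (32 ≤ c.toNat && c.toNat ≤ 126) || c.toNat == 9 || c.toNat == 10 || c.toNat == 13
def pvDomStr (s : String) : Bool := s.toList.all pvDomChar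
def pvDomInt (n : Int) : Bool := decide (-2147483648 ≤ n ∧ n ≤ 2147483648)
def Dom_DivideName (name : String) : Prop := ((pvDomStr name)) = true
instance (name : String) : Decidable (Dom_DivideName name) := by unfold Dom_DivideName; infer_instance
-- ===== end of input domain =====

-- B separates boundary detection (a cut-index list) from segment emission (slicing between
-- consecutive cuts), instead of A's single loop with inline appends and carried state (objective: alternative).

-- ===== PORT A =====
-- literal port of A: one fold over range(1, len(name)) carrying (start, move, result);
-- name[i] is always in range (1 ≤ i < len), so the total pyGetD with a non-alpha default is exact;
-- "".join([j for j in name[start:move]]) is the slice itself.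
def DivideName (name : String) : List String :=
  let n : Int := PySem.Str.len name
  (((PySem.List.pyRange 1 n 1).foldl
    (fun (st : Int × Int × List String) i =>
      let move := i
      let sr :=
        if PySem.Chars.isalpha (PySem.List.pyGetD name.toList i ' ') then
          (i, st.2.2 ++ [PySem.Str.replace (PySem.Str.slice name (some st.1) (some move)) "_" "."])
        else (st.1, st.2.2)
      let result :=
        if i = n - 1 then
          sr.2 ++ [PySem.Str.replace (PySem.Str.slice name (some sr.1) (some (move + 1))) "_" "."]
        else sr.2
      (sr.1, move, result))
    (0, 0, [])).2.2)

-- ===== PORT B =====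
-- literal port of Source B: early guard, cut-index list by a filter, then slice between consecutive cuts
def DivideName_alt (name : String) : List String :=
  let n : Int := PySem.Str.len name
  if n < 2 then []
  else
    let cuts : List Int :=
      [0] ++ (PySem.List.pyRange 1 n 1).filter
               (fun i => PySem.Chars.isalpha (PySem.List.pyGetD name.toList i ' ')) ++ [n]
    (PySem.List.pyRange 0 (PySem.List.len cuts - 1) 1).map (fun k =>
      PySem.Str.replace
        (PySem.Str.slice name (some (PySem.List.pyGetD cuts k 0)) (some (PySem.List.pyGetD cuts (k + 1) 0)))
        "_" ".")

-- ===== PRECONDITION & SPEC =====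
def Spec_DivideName (name : String) (out : List String) : Prop := out = DivideName_alt name
instance (name : String) (out : List String) : Decidable (Spec_DivideName name out) := by unfold Spec_DivideName; infer_instance

-- ===== CLAIM (what is proved, stated in full; the proofs are below) =====
def Claim_equal_DivideName : Prop := ∀ (name : String), Dom_DivideName name → Spec_DivideName name (DivideName name)

-- ===== LEMMAS AND PROOFS =====

-- proof helpers: pairsMap f [c0, c1, ..., ck] = [f c0 c1, ..., f c(k-1) ck]
def pairsMap (f : Int → Int → String) : List Int → List String
  | a :: b :: t => f a b :: pairsMap f (b :: t)
  | _ => []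

theorem pairsMap_single (f : Int → Int → String) (a : Int) : pairsMap f [a] = [] := rfl
theorem pairsMap_cons₂ (f : Int → Int → String) (a b : Int) (t : List Int) :
    pairsMap f (a :: b :: t) = f a b :: pairsMap f (b :: t) := rfl

theorem pairsMap_append_singleton (f : Int → Int → String) (a x : Int) : ∀ (l : List Int),
    pairsMap f (a :: (l ++ [x])) = pairsMap f (a :: l) ++ [f ((a :: l).getLastD 0) x]
  | [] => rfl
  | b :: t => by
    have := pairsMap_append_singleton f b x t
    simp only [List.cons_append, pairsMap_cons₂] at this ⊢
    simp [this]

theorem getLastD_cons_concat (a x d : Int) (l : List Int) :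
    (a :: (l ++ [x])).getLastD d = x := by
  rw [← List.cons_append]; exact List.getLastD_concat ..

theorem pairsMap_cons_append₂ (f : Int → Int → String) (a x y : Int) (l : List Int) :
    pairsMap f (a :: (l ++ [x, y]))
      = pairsMap f (a :: l) ++ [f ((a :: l).getLastD 0) x, f x y] := by
  rw [show a :: (l ++ [x, y]) = a :: ((l ++ [x]) ++ [y]) from by simp,
    pairsMap_append_singleton, pairsMap_append_singleton, getLastD_cons_concat]
  simp

theorem rangePairs (f : Int → Int → String) : ∀ (t : List Int) (a : Int),
    (List.range t.length).map (fun k => f ((a :: t).getD k 0) ((a :: t).getD (k + 1) 0))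
      = pairsMap f (a :: t)
  | [], a => by simp [pairsMap_single]
  | b :: t, a => by
    have ih := rangePairs f t b
    simp only [List.length_cons, List.range_succ_eq_map, List.map_cons, List.map_map]
    simp only [Function.comp_def, List.getD_cons_succ, List.getD_cons_zero]
    rw [pairsMap_cons₂]
    exact congrArg _ ih

theorem genericB (f : Int → Int → String) (a : Int) (t : List Int) :
    (PySem.List.pyRange 0 (PySem.List.len (a :: t) - 1) 1).map
      (fun k => f (PySem.List.pyGetD (a :: t) k 0) (PySem.List.pyGetD (a :: t) (k + 1) 0))
      = pairsMap f (a :: t) := by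
  have hb : PySem.List.len (a :: t) - 1 = ((t.length : Int)) := by
    simp [PySem.List.len_eq]
  rw [hb, PySem.List.pyRange_one, List.map_map]
  have : ((t.length : Int) - 0).toNat = t.length := by omega
  rw [this]
  simp only [Function.comp_def, zero_add, ← Nat.cast_add_one, PySem.List.pyGetD_natCast]
  exact rangePairs f t a

theorem foldA (P : Int → Bool) (f : Int → Int → String) (n : Int) :
    ∀ m : Int, 1 ≤ m → m ≤ n - 1 →
    (PySem.List.pyRange 1 m 1).foldl
      (fun (st : Int × Int × List String) i =>
        let move := i
        let sr := if P i then (i, st.2.2 ++ [f st.1 move]) else (st.1, st.2.2)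
        let result := if i = n - 1 then sr.2 ++ [f sr.1 (move + 1)] else sr.2
        (sr.1, move, result))
      (0, 0, []) =
    ((0 :: (PySem.List.pyRange 1 m 1).filter P).getLastD 0, m - 1,
      pairsMap f (0 :: (PySem.List.pyRange 1 m 1).filter P)) := by
  intro m hm
  induction m, hm using Int.le_induction with
  | base =>
    intro _
    rw [PySem.List.pyRange_one_eq_nil (le_refl 1)]
    simp [pairsMap_single]
  | succ m hm ih =>
    intro hle
    rw [PySem.List.pyRange_one_succ_right hm, List.foldl_append, ih (by omega),
      List.foldl_cons, List.foldl_nil]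
    have hne : ¬ (m = n - 1) := by omega
    by_cases hP : P m = true
    · simp only [hP, if_true, if_neg hne, List.filter_append, List.filter_cons, List.filter_nil]
      rw [pairsMap_append_singleton, getLastD_cons_concat]
      simp
    · simp only [hP, if_false, if_neg hne, List.filter_append, List.filter_cons, List.filter_nil,
        Bool.false_eq_true]
      simp

theorem genericA (P : Int → Bool) (f : Int → Int → String) (n : Int) (h2 : 2 ≤ n) :
    ((PySem.List.pyRange 1 n 1).foldl
      (fun (st : Int × Int × List String) i =>
        let move := i
        let sr := if P i then (i, st.2.2 ++ [f st.1 move]) else (st.1, st.2.2)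
        let result := if i = n - 1 then sr.2 ++ [f sr.1 (move + 1)] else sr.2
        (sr.1, move, result))
      (0, 0, [])).2.2
    = pairsMap f (0 :: ((PySem.List.pyRange 1 n 1).filter P ++ [n])) := by
  have hsplit : PySem.List.pyRange 1 n 1 = PySem.List.pyRange 1 (n - 1) 1 ++ [n - 1] := by
    have h := PySem.List.pyRange_one_succ_right (a := 1) (b := n - 1) (by omega)
    rw [show n - 1 + 1 = n from by ring] at h
    exact h
  rw [hsplit, List.foldl_append, foldA P f n (n - 1) (by omega) (le_refl _),
    List.foldl_cons, List.foldl_nil, List.filter_append, List.filter_cons, List.filter_nil]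
  by_cases hP : P (n - 1) = true
  · simp only [hP, if_true, List.append_assoc, List.cons_append,
      List.nil_append]
    rw [pairsMap_cons_append₂]
    simp [show n - 1 + 1 = n from by ring]
  · simp [hP, pairsMap_append_singleton, show n - 1 + 1 = n from by ring]


set_option maxHeartbeats 1000000 in
theorem DivideName_eq_alt (name : String) : DivideName name = DivideName_alt name := by
  by_cases h : PySem.Str.len name < 2
  · have hnil : PySem.List.pyRange 1 (PySem.Str.len name) 1 = [] :=
      PySem.List.pyRange_one_eq_nil (by omega)
    simp only [DivideName, DivideName_alt]
    rw [hnil, if_pos h]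
    rfl
  · have h2 : 2 ≤ PySem.Str.len name := by omega
    have hA : DivideName name
        = pairsMap (fun a b => PySem.Str.replace (PySem.Str.slice name (some a) (some b)) "_" ".")
            (0 :: ((PySem.List.pyRange 1 (PySem.Str.len name) 1).filter
                (fun i => PySem.Chars.isalpha (PySem.List.pyGetD name.toList i ' '))
              ++ [PySem.Str.len name])) :=
      genericA (fun i => PySem.Chars.isalpha (PySem.List.pyGetD name.toList i ' '))
        (fun a b => PySem.Str.replace (PySem.Str.slice name (some a) (some b)) "_" ".")
        (PySem.Str.len name) h2
    have hB : DivideName_alt name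
        = pairsMap (fun a b => PySem.Str.replace (PySem.Str.slice name (some a) (some b)) "_" ".")
            (0 :: ((PySem.List.pyRange 1 (PySem.Str.len name) 1).filter
                (fun i => PySem.Chars.isalpha (PySem.List.pyGetD name.toList i ' '))
              ++ [PySem.Str.len name])) := by
      simp only [DivideName_alt]
      rw [if_neg h]
      exact genericB
        (fun a b => PySem.Str.replace (PySem.Str.slice name (some a) (some b)) "_" ".") 0
        ((PySem.List.pyRange 1 (PySem.Str.len name) 1).filter
            (fun i => PySem.Chars.isalpha (PySem.List.pyGetD name.toList i ' '))
          ++ [PySem.Str.len name])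
    rw [hA, hB]

-- ===== VERDICT (by name: the statement is the Claim_ definition above) =====
theorem DivideName_spec : Claim_equal_DivideName := by
  intro name _
  show DivideName name = DivideName_alt name
  exact DivideName_eq_alt name
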